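-- pv_equiv track=rewrite | github.com/Leibniz23/MC102 | tarefa05/sequencias.py | minima_distancia
-- ===== SOURCE A (Python) =====
-- def distancia_hamming(a, b):
--     """
--     Recebe duas strings de mesmo tamanho, a e b.
--     Devolve a distância de Hamming entre as duas.
--     """
--     distancia_hamming = 0
--     for i in range(len(a)):
--         for j in a[i]:
--             if j != b[i]:
--                 distancia_hamming += 1
--
--     return distancia_hamming
--
-- def minima_distancia(alvo, candidatos):
--     """
--     Recebe uma string alvo e uma lista de strings candidatas.
--     Devolve um par contendo a string candidata com menor distância
--     de Hamming até o alvo, além da distância.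
--
--     Exemplo de uso: sequencia, valor = minima_distancia(alvo, candidatos)
--     """
--
--     menor_distancia = distancia_hamming(alvo,candidatos[0])
--     menor_distancia_candidato = candidatos[0]
--     for candidato in candidatos:
--         if distancia_hamming(alvo,candidato) < menor_distancia:
--             menor_distancia = distancia_hamming(alvo,candidato)
--             menor_distancia_candidato = candidato
--
--     return menor_distancia_candidato, menor_distancia
-- ===== SOURCE B (Python) =====
-- def distancia_hamming(a, b):
--     """
--     Recebe duas strings de mesmo tamanho, a e b.
--     Devolve a distância de Hamming entre as duas.
--     """
--     return sum(1 for i in range(len(a)) if a[i] != b[i])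
--
-- def minima_distancia(alvo, candidatos):
--     """
--     Recebe uma string alvo e uma lista de strings candidatas.
--     Devolve um par contendo a string candidata com menor distância
--     de Hamming até o alvo, além da distância.
--     """
--     decorated = sorted((distancia_hamming(alvo, c), i) for i, c in enumerate(candidatos))
--     d, i = decorated[0]
--     return candidatos[i], d
-- ===== Notes on version B (the rewrite author's own statement) =====
-- stated objective: alternative
-- what changed: Replaces the running-best accumulator loop (which recomputes each Hamming distance up to three times) by a decorate-sort-select pass: build (distance, index) pairs, stably sort them lexicographically and pick the head, recovering the first minimum; the helper becomes a sum over a generator instead of a nested counting loop.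
import Mathlib
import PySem

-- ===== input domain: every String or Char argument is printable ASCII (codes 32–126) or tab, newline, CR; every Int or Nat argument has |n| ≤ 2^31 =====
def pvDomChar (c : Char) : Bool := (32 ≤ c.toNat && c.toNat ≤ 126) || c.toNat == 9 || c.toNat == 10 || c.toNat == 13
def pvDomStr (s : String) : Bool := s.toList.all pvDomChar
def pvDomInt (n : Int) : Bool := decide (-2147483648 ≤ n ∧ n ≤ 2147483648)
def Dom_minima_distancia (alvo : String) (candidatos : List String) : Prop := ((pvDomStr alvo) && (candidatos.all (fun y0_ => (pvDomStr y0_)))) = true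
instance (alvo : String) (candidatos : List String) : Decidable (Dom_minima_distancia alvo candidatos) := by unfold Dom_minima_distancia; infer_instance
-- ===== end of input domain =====

-- B replaces A's running-best loop (which recomputes each Hamming distance up to three times)
-- by decorate-with-(distance,index), stable lexicographic sort, pick the head (objective: alternative).

-- ===== PORT A =====
-- helper distancia_hamming of Source A, literally: the inner 'for j in a[i]' iterates over the
-- one-character string a[i]; b[i] out of range = IndexError (excluded by Pre_), here no-op.
def hammingA (a b : String) : Int :=
  (PySem.List.pyRange 0 (PySem.Str.len a) 1).foldl
    (fun d i =>
      ((PySem.Str.pyGet? a i).elim [] (fun c => [c])).foldl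
        (fun d2 j =>
          match PySem.Str.pyGet? b i with
          | some cb => if j ≠ cb then d2 + 1 else d2
          | none => d2) d) 0

def minima_distancia (alvo : String) (candidatos : List String) : String × Int :=
  match candidatos with
  | [] => ("", 0)  -- candidatos[0] raises IndexError in Python; excluded by Pre_
  | c0 :: _ =>
    candidatos.foldl
      (fun st c => if hammingA alvo c < st.2 then (c, hammingA alvo c) else st)
      (c0, hammingA alvo c0)

-- ===== PORT B =====
-- helper distancia_hamming of Source B: sum(1 for i in range(len(a)) if a[i] != b[i]), counted as
-- the length of the filtered range; exact while b[i] is in range (Pre_ guarantees it — Python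
-- raises IndexError on a shorter b, which Pre_ excludes).
def hammingB (a b : String) : Int :=
  (((PySem.List.pyRange 0 (PySem.Str.len a) 1).filter
      (fun i => PySem.Str.pyGet? a i != PySem.Str.pyGet? b i)).length : Int)

def minima_distancia_alt (alvo : String) (candidatos : List String) : String × Int :=
  let decorated := PySem.List.sorted2
    ((PySem.List.enumerate candidatos).map (fun p => (hammingB alvo p.2, p.1)))
    (fun q => q.1) (fun q => q.2)
  match decorated with
  | [] => ("", 0)  -- decorated[0] raises IndexError in Python; excluded by Pre_
  | (d, i) :: _ =>
    match PySem.List.pyGet? candidatos i with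
    | some c => (c, d)
    | none => ("", 0)  -- unreachable: i is an index of candidatos

-- ===== PRECONDITION & SPEC =====
-- Pre_ excludes exactly the inputs on which the Python A raises: an empty candidate list
-- (IndexError on candidatos[0]) and any candidate shorter than alvo (IndexError on b[i]).
def Pre_minima_distancia (alvo : String) (candidatos : List String) : Prop :=
  candidatos ≠ [] ∧ ∀ c ∈ candidatos, PySem.Str.len alvo ≤ PySem.Str.len c
instance (alvo : String) (candidatos : List String) : Decidable (Pre_minima_distancia alvo candidatos) := by unfold Pre_minima_distancia; infer_instance

def pvWitness_minima_distancia : String × List String := ("ab", ["xb", "ab", "axc"])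

def Spec_minima_distancia (alvo : String) (candidatos : List String) (out : String × Int) : Prop := out = minima_distancia_alt alvo candidatos
instance (alvo : String) (candidatos : List String) (out : String × Int) : Decidable (Spec_minima_distancia alvo candidatos out) := by unfold Spec_minima_distancia; infer_instance

-- ===== CLAIM (what is proved, stated in full; the proofs are below) =====
def Claim_equal_minima_distancia : Prop := ∀ (alvo : String) (candidatos : List String), Dom_minima_distancia alvo candidatos → Pre_minima_distancia alvo candidatos → Spec_minima_distancia alvo candidatos (minima_distancia alvo candidatos)

-- ===== LEMMAS AND PROOFS =====

-- The two Hamming helpers agree whenever b is at least as long as a (which Pre_ guarantees).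
theorem hammingA_eq_hammingB (a b : String) (hab : PySem.Str.len a ≤ PySem.Str.len b) :
    hammingA a b = hammingB a b := by
  unfold hammingA hammingB
  have hbody : ∀ (d : Int) (i : Int), i ∈ PySem.List.pyRange 0 (PySem.Str.len a) 1 →
      ((PySem.Str.pyGet? a i).elim [] (fun c => [c])).foldl
        (fun d2 j =>
          match PySem.Str.pyGet? b i with
          | some cb => if j ≠ cb then d2 + 1 else d2
          | none => d2) d
      = if (PySem.Str.pyGet? a i != PySem.Str.pyGet? b i) then d + 1 else d := by
    intro d i hi
    rw [PySem.List.mem_pyRange_one] at hi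
    obtain ⟨n, rfl⟩ : ∃ n : Nat, i = (n : Int) := ⟨i.toNat, by omega⟩
    have hlena : n < a.toList.length := by
      have := hi.2; simp only [PySem.Str.len_eq] at this; exact_mod_cast this
    have hlenb : n < b.toList.length := by
      simp only [PySem.Str.len_eq] at hab; omega
    have ha : PySem.Str.pyGet? a (n : Int) = some (a.toList[n]'hlena) := by
      rw [PySem.Str.pyGet?_natCast a n]; exact List.getElem?_eq_getElem hlena
    have hb : PySem.Str.pyGet? b (n : Int) = some (b.toList[n]'hlenb) := by
      rw [PySem.Str.pyGet?_natCast b n]; exact List.getElem?_eq_getElem hlenb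
    rw [ha, hb]
    by_cases h : a.toList[n]'hlena = b.toList[n]'hlenb <;> simp [h, List.foldl]
  rw [PySem.List.foldl_congr_mem _ _ _ _ hbody, PySem.List.foldl_if_add_one]
  simp [List.countP_eq_length_filter]

-- enumerate's cons equation.
theorem enumerate_cons {α : Type} (x : α) (t : List α) (s : Int) :
    PySem.List.enumerate (x :: t) s = (s, x) :: PySem.List.enumerate t (s + 1) := rfl

-- Elements of enumerate cs k are (k + j, cs[j]).
theorem mem_enumerate {α : Type} (cs : List α) (k : Int) (p : Int × α)
    (hp : p ∈ PySem.List.enumerate cs k) :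
    ∃ j : Nat, p.1 = k + (j : Int) ∧ cs[j]? = some p.2 := by
  induction cs generalizing k with
  | nil => simp [PySem.List.enumerate] at hp
  | cons c cs ih =>
    rw [enumerate_cons] at hp
    rcases List.mem_cons.mp hp with h | h
    · exact ⟨0, by simp [h]⟩
    · obtain ⟨j, hj1, hj2⟩ := ih (k + 1) h
      exact ⟨j + 1, by push_cast; omega, by simpa using hj2⟩

-- Head of an insertBy step.
theorem head?_insertBy {α : Type} (before : α → α → Bool) (x : α) (ys : List α) :
    (PySem.List.insertBy before x ys).head? =
      some (match ys with | [] => x | y :: _ => if before x y then x else y) := by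
  cases ys with
  | nil => simp [PySem.List.insertBy]
  | cons y ys => simp only [PySem.List.insertBy]; split <;> simp

-- The head of an insertion-sort fold is itself a fold: the running strict minimum.
theorem head?_foldl_insertBy {α : Type} (before : α → α → Bool) (l : List α) (acc : List α) :
    (l.foldl (fun acc x => PySem.List.insertBy before x acc) acc).head? =
      l.foldl (fun h x =>
        some (match h with | none => x | some y => if before x y then x else y)) acc.head? := by
  induction l generalizing acc with
  | nil => rfl
  | cons x l ih =>
    rw [List.foldl_cons, List.foldl_cons, ih, head?_insertBy]
    cases acc <;> rfl

-- A fold of the option-valued running minimum started at some h0 stays some.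
theorem foldl_option_min {α : Type} (before : α → α → Bool) (l : List α) (h0 : α) :
    l.foldl (fun h x =>
        some (match h with | none => x | some y => if before x y then x else y)) (some h0) =
      some (l.foldl (fun h x => if before x h then x else h) h0) := by
  induction l generalizing h0 with
  | nil => rfl
  | cons x l ih => rw [List.foldl_cons, List.foldl_cons]; exact ih _

-- Main invariant: over the enumerated tail, B's lexicographic running minimum tracks A's
-- running-best state (distance and a candidate the index looks up).
theorem invar (f : String → Int) (full : List String) (cs : List String) :
    ∀ (k : Int) (c : String) (m i : Int), i < k →
      PySem.List.pyGet? full i = some c →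
      (∀ p ∈ PySem.List.enumerate cs k, PySem.List.pyGet? full p.1 = some p.2) →
      (let rB := ((PySem.List.enumerate cs k).map (fun p => (f p.2, p.1))).foldl
          (fun h x => if (decide (x.1 < h.1) || (!decide (h.1 < x.1) && decide (x.2 < h.2)))
            then x else h) (m, i);
       let rA := cs.foldl (fun st c' => if f c' < st.2 then (c', f c') else st) (c, m);
       rB.1 = rA.2 ∧ PySem.List.pyGet? full rB.2 = some rA.1 ∧ rB.2 < k + cs.length) := by
  induction cs with
  | nil => intro k c m i hik hc _; exact ⟨rfl, hc, by simpa using hik⟩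
  | cons c' cs ih =>
    intro k c m i hik hc H
    rw [enumerate_cons] at H ⊢
    simp only [List.map_cons, List.foldl_cons]
    have hc' : PySem.List.pyGet? full k = some c' := H (k, c') (List.mem_cons_self ..)
    have Ht : ∀ p ∈ PySem.List.enumerate cs (k + 1), PySem.List.pyGet? full p.1 = some p.2 :=
      fun p hp => H p (List.mem_cons_of_mem _ hp)
    by_cases hlt : f c' < m
    · have : (if (decide (f c' < m) || (!decide (m < f c') && decide (k < i)))
          then ((f c', k) : Int × Int) else (m, i)) = (f c', k) := by
        simp [hlt]
      rw [this]
      have := ih (k + 1) c' (f c') k (by omega) hc' Ht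
      simpa [hlt, show k + 1 + (cs.length : Int) = k + (cs.length + 1 : Nat) by push_cast; omega]
        using this
    · have hki : ¬ (k < i) := by omega
      have : (if (decide (f c' < m) || (!decide (m < f c') && decide (k < i)))
          then ((f c', k) : Int × Int) else (m, i)) = (m, i) := by
        simp [hlt, hki]
      rw [this]
      have := ih (k + 1) c m i (by omega) hc Ht
      simpa [hlt, show k + 1 + (cs.length : Int) = k + (cs.length + 1 : Nat) by push_cast; omega]
        using this
-- ===== VERDICT (by name: the statement is the Claim_ definition above) =====
theorem minima_distancia_spec : Claim_equal_minima_distancia := by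
  intro alvo candidatos _hdom hpre
  unfold Spec_minima_distancia
  obtain ⟨hne, hlen⟩ := hpre
  cases candidatos with
  | nil => exact absurd rfl hne
  | cons c0 cs =>
    -- A's loop, with hammingA rewritten to hammingB on the members, first iteration a no-op
    have hA : minima_distancia alvo (c0 :: cs)
        = cs.foldl (fun st c => if hammingB alvo c < st.2 then (c, hammingB alvo c) else st)
            (c0, hammingB alvo c0) := by
      have hstep : ∀ (st : String × Int) (c : String), c ∈ c0 :: cs →
          (if hammingA alvo c < st.2 then (c, hammingA alvo c) else st)
            = (if hammingB alvo c < st.2 then (c, hammingB alvo c) else st) := by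
        intro st c hcmem
        rw [hammingA_eq_hammingB alvo c (hlen c hcmem)]
      show (c0 :: cs).foldl
          (fun st c => if hammingA alvo c < st.2 then (c, hammingA alvo c) else st)
          (c0, hammingA alvo c0) = _
      rw [PySem.List.foldl_congr_mem _ _ _ _ hstep,
        hammingA_eq_hammingB alvo c0 (hlen c0 (List.mem_cons_self ..)),
        List.foldl_cons, if_neg (lt_irrefl _)]
    -- B's sorted head is the lexicographic running minimum over the decorated tail
    set f := hammingB alvo with hf
    set before : Int × Int → Int × Int → Bool :=
      fun x h => decide (x.1 < h.1) || (!decide (h.1 < x.1) && decide (x.2 < h.2)) with hbef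
    have hdec : PySem.List.sorted2
        ((PySem.List.enumerate (c0 :: cs)).map (fun p => (f p.2, p.1)))
        (fun q => q.1) (fun q => q.2)
        = ((PySem.List.enumerate (c0 :: cs)).map (fun p => (f p.2, p.1))).foldl
            (fun acc x => PySem.List.insertBy before x acc) [] := rfl
    have hhead : (PySem.List.sorted2
        ((PySem.List.enumerate (c0 :: cs)).map (fun p => (f p.2, p.1)))
        (fun q => q.1) (fun q => q.2)).head?
        = some (((PySem.List.enumerate cs 1).map (fun p => (f p.2, p.1))).foldl
            (fun h x => if before x h then x else h) (f c0, 0)) := by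
      rw [hdec, head?_foldl_insertBy]
      rw [show PySem.List.enumerate (c0 :: cs) = ((0 : Int), c0) :: PySem.List.enumerate cs 1
        from rfl]
      rw [List.map_cons, List.foldl_cons]
      exact foldl_option_min before _ _
    have hinv := invar f (c0 :: cs) cs 1 c0 (f c0) 0 (by omega)
      (by rw [show (0 : Int) = ((0 : Nat) : Int) from rfl, PySem.List.pyGet?_natCast]; rfl)
      (by intro p hp
          obtain ⟨j, hj1, hj2⟩ := mem_enumerate cs 1 p hp
          rw [hj1, show (1 : Int) + (j : Int) = ((j + 1 : Nat) : Int) by push_cast; omega,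
            PySem.List.pyGet?_natCast]
          simpa using hj2)
    set rB := ((PySem.List.enumerate cs 1).map (fun p => (f p.2, p.1))).foldl
      (fun h x => if before x h then x else h) (f c0, 0) with hrB
    set rA := cs.foldl (fun st c' => if f c' < st.2 then (c', f c') else st) (c0, f c0) with hrA
    obtain ⟨h1, h2, -⟩ := hinv
    -- assemble
    rw [hA]
    unfold minima_distancia_alt
    rw [← hf]
    cases hd : PySem.List.sorted2
        ((PySem.List.enumerate (c0 :: cs)).map (fun p => (f p.2, p.1)))
        (fun q => q.1) (fun q => q.2) with
    | nil => rw [hd] at hhead; simp at hhead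
    | cons q rest =>
      rw [hd] at hhead
      simp only [List.head?_cons, Option.some.injEq] at hhead
      obtain ⟨d, i⟩ := q
      have hq : d = rB.1 ∧ i = rB.2 := by
        constructor
        · exact congrArg Prod.fst hhead
        · exact congrArg Prod.snd hhead
      simp only [hq.1, hq.2, h1, h2]
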